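-- pv_equiv track=rewrite | github.com/jerhardt1/QTools | qLattice.py | getMaxValues
-- ===== SOURCE A (Python) =====
-- def getMaxValues(input_list):
--     ValuesX = []
--     ValuesY = []
--     ValuesZ = []
--
--     # put x, y and z vectors in seperate lists
--     for v in input_list:
--         ValuesX.append((v[0]))
--         ValuesY.append((v[1]))
--         ValuesZ.append((v[2]))
--
--     maxX = max(ValuesX)
--     maxY = max(ValuesY)
--     maxZ = max(ValuesZ)
--
--     return maxX,maxY,maxZ
-- ===== SOURCE B (Python) =====
-- def getMaxValues(input_list):
--     # single pass: running maxima of the three components; no intermediate lists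
--     it = iter(input_list)
--     try:
--         maxX, maxY, maxZ = next(it)
--     except StopIteration:
--         raise ValueError("max() arg is an empty sequence")
--     for x, y, z in it:
--         if x > maxX: maxX = x
--         if y > maxY: maxY = y
--         if z > maxZ: maxZ = z
--     return maxX, maxY, maxZ
-- ===== Notes on version B (the rewrite author's own statement) =====
-- stated objective: alternative
-- what changed: Replaces the three list-building passes plus three max() calls with one single pass keeping running maxima of the three components, with no intermediate lists.
import Mathlib
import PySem

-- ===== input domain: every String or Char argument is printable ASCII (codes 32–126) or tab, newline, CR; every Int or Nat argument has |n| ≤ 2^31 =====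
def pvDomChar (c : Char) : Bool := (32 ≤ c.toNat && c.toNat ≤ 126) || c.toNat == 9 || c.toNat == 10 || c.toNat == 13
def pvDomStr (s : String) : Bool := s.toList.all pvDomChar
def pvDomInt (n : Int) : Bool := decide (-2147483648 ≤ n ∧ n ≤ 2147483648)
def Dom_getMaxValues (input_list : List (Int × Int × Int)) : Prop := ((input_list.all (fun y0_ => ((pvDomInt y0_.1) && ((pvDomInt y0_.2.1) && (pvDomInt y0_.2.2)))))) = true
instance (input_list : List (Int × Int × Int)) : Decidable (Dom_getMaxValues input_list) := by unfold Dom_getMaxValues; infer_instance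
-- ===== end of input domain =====

-- B replaces A's three list-building passes + three max() calls with a single pass of
-- running component maxima; equal return value on every nonempty list (Pre_ excludes [],
-- where both Pythons raise).

-- ===== PORT A =====
def getMaxValues (input_list : List (Int × Int × Int)) : Int × Int × Int :=
  -- the for-loop appending to ValuesX/ValuesY/ValuesZ, as a fold over the same state
  let lists := input_list.foldl
    (fun (acc : List Int × List Int × List Int) v =>
      (acc.1 ++ [v.1], acc.2.1 ++ [v.2.1], acc.2.2 ++ [v.2.2]))
    ([], [], [])
  -- max(...) raises ValueError on an empty list; Pre_ excludes that, .getD 0 is unreachable there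
  let maxX := (PySem.List.max? lists.1 (fun y => y)).getD 0
  let maxY := (PySem.List.max? lists.2.1 (fun y => y)).getD 0
  let maxZ := (PySem.List.max? lists.2.2 (fun y => y)).getD 0
  (maxX, maxY, maxZ)

-- ===== PORT B =====
def getMaxValues_alt (input_list : List (Int × Int × Int)) : Int × Int × Int :=
  match input_list with
  | [] => (0, 0, 0)   -- Source B raises ValueError here; outside Pre_
  | v :: rest =>
    rest.foldl
      (fun (a : Int × Int × Int) w =>
        (if w.1 > a.1 then w.1 else a.1,
         if w.2.1 > a.2.1 then w.2.1 else a.2.1,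
         if w.2.2 > a.2.2 then w.2.2 else a.2.2))
      v

-- ===== PRECONDITION & SPEC =====
-- A raises ValueError (max of empty list) on []; Source B raises there too.
def Pre_getMaxValues (input_list : List (Int × Int × Int)) : Prop := input_list ≠ []
instance (input_list : List (Int × Int × Int)) : Decidable (Pre_getMaxValues input_list) := by
  unfold Pre_getMaxValues; infer_instance
def pvWitness_getMaxValues : (List (Int × Int × Int)) := [(1, 2, 3), (4, 0, -1)]
def Spec_getMaxValues (input_list : List (Int × Int × Int)) (out : Int × Int × Int) : Prop := out = getMaxValues_alt input_list
instance (input_list : List (Int × Int × Int)) (out : Int × Int × Int) : Decidable (Spec_getMaxValues input_list out) := by unfold Spec_getMaxValues; infer_instance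

-- ===== CLAIM (what is proved, stated in full; the proofs are below) =====
def Claim_equal_getMaxValues : Prop := ∀ (input_list : List (Int × Int × Int)), Dom_getMaxValues input_list → Pre_getMaxValues input_list → Spec_getMaxValues input_list (getMaxValues input_list)

-- ===== LEMMAS AND PROOFS =====

lemma build_lists (xs : List (Int × Int × Int)) (ax ay az : List Int) :
    xs.foldl
      (fun (acc : List Int × List Int × List Int) v =>
        (acc.1 ++ [v.1], acc.2.1 ++ [v.2.1], acc.2.2 ++ [v.2.2]))
      (ax, ay, az)
    = (ax ++ xs.map (·.1), ay ++ xs.map (·.2.1), az ++ xs.map (·.2.2)) := by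
  induction xs generalizing ax ay az with
  | nil => simp
  | cons v t ih => simp [List.foldl_cons, ih]

lemma if_gt_eq_max (a b : Int) : (if b > a then b else a) = max a b := by
  rw [max_def]; split_ifs <;> omega

lemma alt_fold (rest : List (Int × Int × Int)) (a : Int × Int × Int) :
    rest.foldl
      (fun (a : Int × Int × Int) w =>
        (if w.1 > a.1 then w.1 else a.1,
         if w.2.1 > a.2.1 then w.2.1 else a.2.1,
         if w.2.2 > a.2.2 then w.2.2 else a.2.2))
      a
    = ((rest.map (·.1)).foldl max a.1,
       (rest.map (·.2.1)).foldl max a.2.1,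
       (rest.map (·.2.2)).foldl max a.2.2) := by
  induction rest generalizing a with
  | nil => simp
  | cons w t ih =>
    rw [List.foldl_cons, ih]
    simp only [List.map_cons, List.foldl_cons, if_gt_eq_max]

-- ===== VERDICT (by name: the statement is the Claim_ definition above) =====
theorem getMaxValues_spec : Claim_equal_getMaxValues := by
  intro input_list _ hpre
  unfold Spec_getMaxValues getMaxValues getMaxValues_alt
  match input_list with
  | [] => exact absurd rfl hpre
  | v :: rest =>
    simp only [build_lists, alt_fold, List.nil_append, List.map_cons,
      PySem.List.max?_id_cons, Option.getD_some]
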